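-- pv_equiv track=rewrite | github.com/andremarqueda1/Proyect-Cypher | Playfair.py | GeneraMatriz
-- ===== SOURCE A (Python) =====
-- def GeneraListaAlfabeto():  # Genera una lista con el alfafabeto definido.
--     alfabeto = "ABCDEFGHIKLMNOPQRSTUVWXYZ"  # Alfabeto a implementar, no se incluye las letras J ni Ñ
--     lista = []
--
--     for letra in alfabeto:
--         lista.append(letra) # Añadimos elemento a elemento del alfabeto dentro de la lista.
--
--     return lista    # Regresamos la lista con el alfabeto completo.
--
-- def GeneraMatriz(key):
--     alfabeto = GeneraListaAlfabeto()    #Generamos una lista con el alfabeto a implementar.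
--     matriz = [[0, 0, 0, 0, 0], [0, 0, 0, 0, 0], [0, 0, 0, 0, 0], [0, 0, 0, 0, 0], [0, 0, 0, 0, 0]]  # Declaramos una matriz de 5x5.
--     fila = 0    # Declaramos variables.
--     columna = 0
--     posicion = 0
--
--     for letra in key:   # Definimos la fila en donde se encuentra la letra de la llave en análisis.
--         if(posicion < 5):
--             fila = 0
--         elif (posicion < 10):
--             fila = 1
--         elif (posicion < 15):
--             fila = 2
--         elif (posicion < 20):
--             fila = 3
--         elif (posicion < 25):
--             fila = 4
--         columna = posicion % 5
--
--         if(letra in alfabeto):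
--             alfabeto.remove(letra)  # Eliminamos de la lista aquellas letras que contenga la llave.
--             matriz[fila][columna] = letra   # Insertamos la letra del alfabeto en la matriz de 5x5.
--             posicion += 1
--
--     while (len(alfabeto) > 0):
--         if(posicion < 5):   # Definimos la fila en donde se encuentra la letra de la llave en análisis.
--             fila = 0
--         elif (posicion < 10):
--             fila = 1
--         elif (posicion < 15):
--             fila = 2
--         elif (posicion < 20):
--             fila = 3
--         elif (posicion < 25):
--             fila = 4
--         columna = posicion % 5
--         matriz[fila][columna] = alfabeto.pop(0) # Insertamos las letras restantes de la lista a la matriz de 5x5.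
--         posicion += 1
--
--     return matriz
-- ===== SOURCE B (Python) =====
-- def GeneraMatriz(key):
--     alfabeto = list("ABCDEFGHIKLMNOPQRSTUVWXYZ")  # sin J ni N-tilde
--     # Phase 1: build the flat 25-letter sequence (key letters first, dedup, then fillers).
--     seq = []
--     for letra in key:
--         if letra in alfabeto and letra not in seq:
--             seq.append(letra)
--     for letra in alfabeto:
--         if letra not in seq:
--             seq.append(letra)
--     # Phase 2: reshape into the 5x5 matrix.
--     return [seq[i * 5:i * 5 + 5] for i in range(5)]
-- ===== Notes on version B (the rewrite author's own statement) =====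
-- stated objective: simpler
-- what changed: B first builds the flat ordered 25-letter sequence (deduped key letters then remaining alphabet) and reshapes it into 5x5 by slicing, instead of A's two positional-fill loops that destructively remove/pop from the alphabet list and compute fila/columna per cell.
import Mathlib
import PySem

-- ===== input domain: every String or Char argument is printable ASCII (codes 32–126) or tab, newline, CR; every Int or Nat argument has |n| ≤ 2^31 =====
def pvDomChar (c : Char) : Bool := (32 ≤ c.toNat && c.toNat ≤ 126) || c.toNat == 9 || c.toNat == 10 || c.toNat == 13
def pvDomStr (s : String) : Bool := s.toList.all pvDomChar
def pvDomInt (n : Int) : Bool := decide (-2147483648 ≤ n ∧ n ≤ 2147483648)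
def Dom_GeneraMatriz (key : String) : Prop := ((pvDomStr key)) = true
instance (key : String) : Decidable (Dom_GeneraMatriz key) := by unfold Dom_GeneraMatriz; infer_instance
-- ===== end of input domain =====

-- B builds the flat 25-letter sequence first and reshapes it by slicing, replacing A's two
-- positional-fill loops (simpler decomposition; no speed claim).

-- ===== PORT A =====
def GeneraListaAlfabeto : List String :=
  "ABCDEFGHIKLMNOPQRSTUVWXYZ".toList.foldl (fun lista letra => lista ++ [letra.toString]) []

-- Python's initial matrix holds the int 0 as placeholder; every one of the 25 cells is
-- overwritten before return, so the string placeholder "0" used here never appears in the output.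
def pvM0 : List (List String) :=
  [["0","0","0","0","0"], ["0","0","0","0","0"], ["0","0","0","0","0"],
   ["0","0","0","0","0"], ["0","0","0","0","0"]]

def pvFila (pos fila : Nat) : Nat :=
  if pos < 5 then 0 else if pos < 10 then 1 else if pos < 15 then 2
  else if pos < 20 then 3 else if pos < 25 then 4 else fila

-- matriz[fila][columna] = v
def pvSetCell (m : List (List String)) (fila columna : Nat) (v : String) : List (List String) :=
  m.set fila ((m.getD fila []).set columna v)

-- the `for letra in key` loop; state (alfabeto, matriz, fila, posicion)
def pvLoopFor : List Char → List String → List (List String) → Nat → Nat →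
    List String × List (List String) × Nat × Nat
  | [], alfa, m, fila, pos => (alfa, m, fila, pos)
  | letra :: rest, alfa, m, fila, pos =>
    let fila' := pvFila pos fila
    let columna := pos % 5
    if letra.toString ∈ alfa then
      -- alfabeto.remove(letra): guarded by the membership test, so remove? is always `some`
      pvLoopFor rest ((PySem.List.remove? alfa letra.toString).getD alfa)
        (pvSetCell m fila' columna letra.toString) fila' (pos + 1)
    else
      pvLoopFor rest alfa m fila' pos

-- the `while len(alfabeto) > 0` loop; alfabeto.pop(0) is the structural head
def pvLoopWhile : List String → List (List String) → Nat → Nat → List (List String)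
  | [], m, _, _ => m
  | l :: rest, m, fila, pos =>
    let fila' := pvFila pos fila
    pvLoopWhile rest (pvSetCell m fila' (pos % 5) l) fila' (pos + 1)

def GeneraMatriz (key : String) : List (List String) :=
  let alfabeto := GeneraListaAlfabeto
  let r := pvLoopFor key.toList alfabeto pvM0 0 0
  pvLoopWhile r.1 r.2.1 r.2.2.1 r.2.2.2

-- ===== PORT B =====
def GeneraMatriz_alt (key : String) : List (List String) :=
  let alfabeto := "ABCDEFGHIKLMNOPQRSTUVWXYZ".toList.map (fun c => c.toString)
  let seq1 := key.toList.foldl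
    (fun seq letra =>
      if letra.toString ∈ alfabeto ∧ letra.toString ∉ seq then seq ++ [letra.toString] else seq) []
  let seq := alfabeto.foldl (fun s letra => if letra ∉ s then s ++ [letra] else s) seq1
  (PySem.List.pyRange 0 5 1).map (fun i => PySem.List.slice seq (some (i * 5)) (some (i * 5 + 5)))

-- ===== PRECONDITION & SPEC =====
def Spec_GeneraMatriz (key : String) (out : List (List String)) : Prop := out = GeneraMatriz_alt key
instance (key : String) (out : List (List String)) : Decidable (Spec_GeneraMatriz key out) := by unfold Spec_GeneraMatriz; infer_instance

-- ===== CLAIM (what is proved, stated in full; the proofs are below) =====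
def Claim_equal_GeneraMatriz : Prop := ∀ (key : String), Dom_GeneraMatriz key → Spec_GeneraMatriz key (GeneraMatriz key)

-- ===== LEMMAS AND PROOFS =====

-- the alphabet as a literal list of one-letter strings
def pvAlfa : List String :=
  ["A","B","C","D","E","F","G","H","I","K","L","M","N","O","P","Q","R","S","T","U","V","W","X","Y","Z"]

-- the flat sequence both programs realise: key letters picked in order of first occurrence,
-- then the untouched alphabet letters
def pvPick : List Char → List String → List String
  | [], avail => avail
  | c :: cs, avail =>
    if c.toString ∈ avail then c.toString :: pvPick cs (avail.erase c.toString)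
    else pvPick cs avail

lemma pvAlfa_eq_gen : GeneraListaAlfabeto = pvAlfa := by decide

lemma pvAlfa_eq_map : "ABCDEFGHIKLMNOPQRSTUVWXYZ".toList.map (fun c => c.toString) = pvAlfa := by decide

lemma pick_length : ∀ (cs : List Char) (avail : List String),
    (pvPick cs avail).length = avail.length := by
  intro cs
  induction cs with
  | nil => intro avail; rfl
  | cons c cs ih =>
    intro avail
    by_cases h : c.toString ∈ avail
    · have h1 : 1 ≤ avail.length := List.length_pos_of_mem h
      simp only [pvPick, if_pos h, List.length_cons, ih, List.length_erase_of_mem h]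
      omega

    · simp only [pvPick, if_neg h, ih]

lemma fila_irrel {pos : Nat} (f1 f2 : Nat) (h : pos < 25) : pvFila pos f1 = pvFila pos f2 := by
  unfold pvFila
  split_ifs <;> omega

lemma while_fila_irrel : ∀ (seq : List String) (m : List (List String)) (f1 f2 pos : Nat),
    pos + seq.length ≤ 25 → pvLoopWhile seq m f1 pos = pvLoopWhile seq m f2 pos := by
  intro seq
  induction seq with
  | nil => intro m f1 f2 pos _; rfl
  | cons l rest ih =>
    intro m f1 f2 pos h
    have hp : pos < 25 := by simp [List.length_cons] at h; omega
    simp only [pvLoopWhile]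
    rw [fila_irrel f1 f2 hp]

lemma run_eq : ∀ (cs : List Char) (avail : List String) (m : List (List String)) (f1 f2 pos : Nat),
    pos + avail.length = 25 →
    pvLoopWhile (pvLoopFor cs avail m f1 pos).1 (pvLoopFor cs avail m f1 pos).2.1
      (pvLoopFor cs avail m f1 pos).2.2.1 (pvLoopFor cs avail m f1 pos).2.2.2
      = pvLoopWhile (pvPick cs avail) m f2 pos := by
  intro cs
  induction cs with
  | nil =>
    intro avail m f1 f2 pos h
    simpa [pvLoopFor, pvPick] using while_fila_irrel avail m f1 f2 pos (by omega)
  | cons c cs ih =>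
    intro avail m f1 f2 pos h
    by_cases hc : c.toString ∈ avail
    · have hp : pos < 25 := by
        have := List.length_pos_of_mem hc; omega
      have hrem : (PySem.List.remove? avail c.toString).getD avail = avail.erase c.toString := by
        rw [PySem.List.remove?_eq_some_erase avail c.toString hc]; rfl
      have hlen : (pos + 1) + (avail.erase c.toString).length = 25 := by
        rw [List.length_erase_of_mem hc]
        have := List.length_pos_of_mem hc; omega
      simp only [pvLoopFor, pvPick, hc, if_true, hrem, pvLoopWhile]
      rw [ih _ _ _ (pvFila pos f2) _ hlen, fila_irrel f1 f2 hp]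
    · simp only [pvLoopFor, pvPick, hc, if_false]
      exact ih _ _ _ f2 _ h

lemma foldl_dedup_append : ∀ (xs acc : List String), xs.Nodup →
    xs.foldl (fun s letra => if letra ∉ s then s ++ [letra] else s) acc
      = acc ++ xs.filter (fun l => l ∉ acc) := by
  intro xs
  induction xs with
  | nil => intro acc _; simp
  | cons x xs ih =>
    intro acc hnd
    have hx : x ∉ xs := (List.nodup_cons.mp hnd).1
    have hxs : xs.Nodup := (List.nodup_cons.mp hnd).2
    by_cases hm : x ∈ acc
    · rw [List.foldl_cons, if_neg (not_not_intro hm), ih acc hxs]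
      simp [hm]
    · rw [List.foldl_cons, if_pos hm, ih _ hxs]
      have : xs.filter (fun l => l ∉ acc ++ [x]) = xs.filter (fun l => l ∉ acc) := by
        apply List.filter_congr
        intro a ha
        have : a ≠ x := fun e => hx (e ▸ ha)
        simp [this]
      rw [this]
      simp [hm]
  
lemma erase_filter (acc : List String) (c : String) :
    (pvAlfa.filter (fun l => l ∉ acc)).erase c
      = pvAlfa.filter (fun l => l ∉ acc ++ [c]) := by
  have hnd : (pvAlfa.filter (fun l => l ∉ acc)).Nodup :=
    List.Nodup.filter _ (by decide)
  rw [List.Nodup.erase_eq_filter hnd]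
  simp only [List.filter_filter]
  apply List.filter_congr
  intro a _
  by_cases h1 : a = c <;> by_cases h2 : a ∈ acc <;> simp [h1, h2]

lemma seq1_pick : ∀ (cs : List Char) (acc : List String),
    (cs.foldl (fun seq letra =>
        if letra.toString ∈ pvAlfa ∧ letra.toString ∉ seq then seq ++ [letra.toString] else seq) acc)
      ++ pvAlfa.filter (fun l => l ∉ cs.foldl (fun seq letra =>
        if letra.toString ∈ pvAlfa ∧ letra.toString ∉ seq then seq ++ [letra.toString] else seq) acc)
      = acc ++ pvPick cs (pvAlfa.filter (fun l => l ∉ acc)) := by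
  intro cs
  induction cs with
  | nil => intro acc; simp [pvPick]
  | cons c cs ih =>
    intro acc
    by_cases hc : c.toString ∈ pvAlfa ∧ c.toString ∉ acc
    · have hmem : c.toString ∈ pvAlfa.filter (fun l => l ∉ acc) := by
        rw [List.mem_filter]
        exact ⟨hc.1, by simpa using hc.2⟩
      rw [List.foldl_cons, if_pos hc, ih (acc ++ [c.toString])]
      simp only [pvPick]
      rw [if_pos hmem, erase_filter]
      simp
    · have hnmem : c.toString ∉ pvAlfa.filter (fun l => l ∉ acc) := by
        intro hm
        rcases List.mem_filter.mp hm with ⟨h1, h2⟩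
        exact hc ⟨h1, by simpa using h2⟩
      rw [List.foldl_cons, if_neg hc, ih acc]
      simp only [pvPick]
      rw [if_neg hnmem]

set_option maxHeartbeats 1000000 in
lemma while_eq_chunk : ∀ (seq : List String), seq.length = 25 →
    pvLoopWhile seq pvM0 0 0
      = (PySem.List.pyRange 0 5 1).map (fun i => PySem.List.slice seq (some (i * 5)) (some (i * 5 + 5))) := by
  intro seq h
  rcases seq with _ | ⟨a0, seq⟩
  · simp at h
  rcases seq with _ | ⟨a1, seq⟩
  · simp at h
  rcases seq with _ | ⟨a2, seq⟩
  · simp at h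
  rcases seq with _ | ⟨a3, seq⟩
  · simp at h
  rcases seq with _ | ⟨a4, seq⟩
  · simp at h
  rcases seq with _ | ⟨a5, seq⟩
  · simp at h
  rcases seq with _ | ⟨a6, seq⟩
  · simp at h
  rcases seq with _ | ⟨a7, seq⟩
  · simp at h
  rcases seq with _ | ⟨a8, seq⟩
  · simp at h
  rcases seq with _ | ⟨a9, seq⟩
  · simp at h
  rcases seq with _ | ⟨a10, seq⟩
  · simp at h
  rcases seq with _ | ⟨a11, seq⟩
  · simp at h
  rcases seq with _ | ⟨a12, seq⟩
  · simp at h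
  rcases seq with _ | ⟨a13, seq⟩
  · simp at h
  rcases seq with _ | ⟨a14, seq⟩
  · simp at h
  rcases seq with _ | ⟨a15, seq⟩
  · simp at h
  rcases seq with _ | ⟨a16, seq⟩
  · simp at h
  rcases seq with _ | ⟨a17, seq⟩
  · simp at h
  rcases seq with _ | ⟨a18, seq⟩
  · simp at h
  rcases seq with _ | ⟨a19, seq⟩
  · simp at h
  rcases seq with _ | ⟨a20, seq⟩
  · simp at h
  rcases seq with _ | ⟨a21, seq⟩
  · simp at h
  rcases seq with _ | ⟨a22, seq⟩
  · simp at h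
  rcases seq with _ | ⟨a23, seq⟩
  · simp at h
  rcases seq with _ | ⟨a24, seq⟩
  · simp at h
  rcases seq with _ | ⟨a25, seq⟩
  · show _ = _
    have h1 : pvLoopWhile [a0,a1,a2,a3,a4,a5,a6,a7,a8,a9,a10,a11,a12,a13,a14,a15,a16,a17,a18,a19,a20,a21,a22,a23,a24] pvM0 0 0 = [[a0,a1,a2,a3,a4],[a5,a6,a7,a8,a9],[a10,a11,a12,a13,a14],[a15,a16,a17,a18,a19],[a20,a21,a22,a23,a24]] := by
      calc pvLoopWhile [a0,a1,a2,a3,a4,a5,a6,a7,a8,a9,a10,a11,a12,a13,a14,a15,a16,a17,a18,a19,a20,a21,a22,a23,a24] pvM0 0 0 = pvLoopWhile [a1,a2,a3,a4,a5,a6,a7,a8,a9,a10,a11,a12,a13,a14,a15,a16,a17,a18,a19,a20,a21,a22,a23,a24] [[a0,"0","0","0","0"],["0","0","0","0","0"],["0","0","0","0","0"],["0","0","0","0","0"],["0","0","0","0","0"]] 0 1 := rfl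
        _ = pvLoopWhile [a2,a3,a4,a5,a6,a7,a8,a9,a10,a11,a12,a13,a14,a15,a16,a17,a18,a19,a20,a21,a22,a23,a24] [[a0,a1,"0","0","0"],["0","0","0","0","0"],["0","0","0","0","0"],["0","0","0","0","0"],["0","0","0","0","0"]] 0 2 := rfl
        _ = pvLoopWhile [a3,a4,a5,a6,a7,a8,a9,a10,a11,a12,a13,a14,a15,a16,a17,a18,a19,a20,a21,a22,a23,a24] [[a0,a1,a2,"0","0"],["0","0","0","0","0"],["0","0","0","0","0"],["0","0","0","0","0"],["0","0","0","0","0"]] 0 3 := rfl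
        _ = pvLoopWhile [a4,a5,a6,a7,a8,a9,a10,a11,a12,a13,a14,a15,a16,a17,a18,a19,a20,a21,a22,a23,a24] [[a0,a1,a2,a3,"0"],["0","0","0","0","0"],["0","0","0","0","0"],["0","0","0","0","0"],["0","0","0","0","0"]] 0 4 := rfl
        _ = pvLoopWhile [a5,a6,a7,a8,a9,a10,a11,a12,a13,a14,a15,a16,a17,a18,a19,a20,a21,a22,a23,a24] [[a0,a1,a2,a3,a4],["0","0","0","0","0"],["0","0","0","0","0"],["0","0","0","0","0"],["0","0","0","0","0"]] 0 5 := rfl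
        _ = pvLoopWhile [a6,a7,a8,a9,a10,a11,a12,a13,a14,a15,a16,a17,a18,a19,a20,a21,a22,a23,a24] [[a0,a1,a2,a3,a4],[a5,"0","0","0","0"],["0","0","0","0","0"],["0","0","0","0","0"],["0","0","0","0","0"]] 1 6 := rfl
        _ = pvLoopWhile [a7,a8,a9,a10,a11,a12,a13,a14,a15,a16,a17,a18,a19,a20,a21,a22,a23,a24] [[a0,a1,a2,a3,a4],[a5,a6,"0","0","0"],["0","0","0","0","0"],["0","0","0","0","0"],["0","0","0","0","0"]] 1 7 := rfl
        _ = pvLoopWhile [a8,a9,a10,a11,a12,a13,a14,a15,a16,a17,a18,a19,a20,a21,a22,a23,a24] [[a0,a1,a2,a3,a4],[a5,a6,a7,"0","0"],["0","0","0","0","0"],["0","0","0","0","0"],["0","0","0","0","0"]] 1 8 := rfl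
        _ = pvLoopWhile [a9,a10,a11,a12,a13,a14,a15,a16,a17,a18,a19,a20,a21,a22,a23,a24] [[a0,a1,a2,a3,a4],[a5,a6,a7,a8,"0"],["0","0","0","0","0"],["0","0","0","0","0"],["0","0","0","0","0"]] 1 9 := rfl
        _ = pvLoopWhile [a10,a11,a12,a13,a14,a15,a16,a17,a18,a19,a20,a21,a22,a23,a24] [[a0,a1,a2,a3,a4],[a5,a6,a7,a8,a9],["0","0","0","0","0"],["0","0","0","0","0"],["0","0","0","0","0"]] 1 10 := rfl
        _ = pvLoopWhile [a11,a12,a13,a14,a15,a16,a17,a18,a19,a20,a21,a22,a23,a24] [[a0,a1,a2,a3,a4],[a5,a6,a7,a8,a9],[a10,"0","0","0","0"],["0","0","0","0","0"],["0","0","0","0","0"]] 2 11 := rfl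
        _ = pvLoopWhile [a12,a13,a14,a15,a16,a17,a18,a19,a20,a21,a22,a23,a24] [[a0,a1,a2,a3,a4],[a5,a6,a7,a8,a9],[a10,a11,"0","0","0"],["0","0","0","0","0"],["0","0","0","0","0"]] 2 12 := rfl
        _ = pvLoopWhile [a13,a14,a15,a16,a17,a18,a19,a20,a21,a22,a23,a24] [[a0,a1,a2,a3,a4],[a5,a6,a7,a8,a9],[a10,a11,a12,"0","0"],["0","0","0","0","0"],["0","0","0","0","0"]] 2 13 := rfl
        _ = pvLoopWhile [a14,a15,a16,a17,a18,a19,a20,a21,a22,a23,a24] [[a0,a1,a2,a3,a4],[a5,a6,a7,a8,a9],[a10,a11,a12,a13,"0"],["0","0","0","0","0"],["0","0","0","0","0"]] 2 14 := rfl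
        _ = pvLoopWhile [a15,a16,a17,a18,a19,a20,a21,a22,a23,a24] [[a0,a1,a2,a3,a4],[a5,a6,a7,a8,a9],[a10,a11,a12,a13,a14],["0","0","0","0","0"],["0","0","0","0","0"]] 2 15 := rfl
        _ = pvLoopWhile [a16,a17,a18,a19,a20,a21,a22,a23,a24] [[a0,a1,a2,a3,a4],[a5,a6,a7,a8,a9],[a10,a11,a12,a13,a14],[a15,"0","0","0","0"],["0","0","0","0","0"]] 3 16 := rfl
        _ = pvLoopWhile [a17,a18,a19,a20,a21,a22,a23,a24] [[a0,a1,a2,a3,a4],[a5,a6,a7,a8,a9],[a10,a11,a12,a13,a14],[a15,a16,"0","0","0"],["0","0","0","0","0"]] 3 17 := rfl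
        _ = pvLoopWhile [a18,a19,a20,a21,a22,a23,a24] [[a0,a1,a2,a3,a4],[a5,a6,a7,a8,a9],[a10,a11,a12,a13,a14],[a15,a16,a17,"0","0"],["0","0","0","0","0"]] 3 18 := rfl
        _ = pvLoopWhile [a19,a20,a21,a22,a23,a24] [[a0,a1,a2,a3,a4],[a5,a6,a7,a8,a9],[a10,a11,a12,a13,a14],[a15,a16,a17,a18,"0"],["0","0","0","0","0"]] 3 19 := rfl
        _ = pvLoopWhile [a20,a21,a22,a23,a24] [[a0,a1,a2,a3,a4],[a5,a6,a7,a8,a9],[a10,a11,a12,a13,a14],[a15,a16,a17,a18,a19],["0","0","0","0","0"]] 3 20 := rfl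
        _ = pvLoopWhile [a21,a22,a23,a24] [[a0,a1,a2,a3,a4],[a5,a6,a7,a8,a9],[a10,a11,a12,a13,a14],[a15,a16,a17,a18,a19],[a20,"0","0","0","0"]] 4 21 := rfl
        _ = pvLoopWhile [a22,a23,a24] [[a0,a1,a2,a3,a4],[a5,a6,a7,a8,a9],[a10,a11,a12,a13,a14],[a15,a16,a17,a18,a19],[a20,a21,"0","0","0"]] 4 22 := rfl
        _ = pvLoopWhile [a23,a24] [[a0,a1,a2,a3,a4],[a5,a6,a7,a8,a9],[a10,a11,a12,a13,a14],[a15,a16,a17,a18,a19],[a20,a21,a22,"0","0"]] 4 23 := rfl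
        _ = pvLoopWhile [a24] [[a0,a1,a2,a3,a4],[a5,a6,a7,a8,a9],[a10,a11,a12,a13,a14],[a15,a16,a17,a18,a19],[a20,a21,a22,a23,"0"]] 4 24 := rfl
        _ = [[a0,a1,a2,a3,a4],[a5,a6,a7,a8,a9],[a10,a11,a12,a13,a14],[a15,a16,a17,a18,a19],[a20,a21,a22,a23,a24]] := rfl
    rw [h1]
    rfl
  · simp at h

-- ===== VERDICT (by name: the statement is the Claim_ definition above) =====
theorem GeneraMatriz_spec : Claim_equal_GeneraMatriz := by
  intro key _
  unfold Spec_GeneraMatriz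
  show GeneraMatriz key = GeneraMatriz_alt key
  have hseq : pvAlfa.foldl (fun s letra => if letra ∉ s then s ++ [letra] else s)
      (key.toList.foldl (fun seq letra =>
        if letra.toString ∈ pvAlfa ∧ letra.toString ∉ seq then seq ++ [letra.toString] else seq) [])
      = pvPick key.toList pvAlfa := by
    rw [foldl_dedup_append _ _ (by decide)]
    simpa using seq1_pick key.toList []
  have hA : GeneraMatriz key = pvLoopWhile (pvPick key.toList pvAlfa) pvM0 0 0 := by
    simp only [GeneraMatriz, pvAlfa_eq_gen]
    exact run_eq key.toList pvAlfa pvM0 0 0 0 (by decide)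
  rw [hA, while_eq_chunk _ (by rw [pick_length]; rfl)]
  simp only [GeneraMatriz_alt, pvAlfa_eq_map, hseq]
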